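-- pv_equiv track=rewrite | github.com/yuan25j/IdiosyncrasiesInLLMs | transform.py | replace_inlines_with_xxx
-- ===== SOURCE A (Python) =====
-- def replace_inlines_with_xxx(line):
--     i = 0
--     length = len(line)
--     result = []
--
--     # stack to keep track of which marker we are "inside" currently.
--     marker_stack = []
--
--     # helper to see if the substring at i starts with a marker
--     # handle '**', '*', '`', etc.
--     def check_marker(s, pos):
--         # return (marker_str, marker_length) or (None, 0)
--         if s.startswith('```', pos):  # triple backtick inline is rare but let's skip
--             return ('```', 3)
--         if s.startswith('**', pos):
--             return ('**', 2)
--         if s.startswith('*', pos):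
--             return ('*', 1)
--         if s.startswith('`', pos):
--             return ('`', 1)
--         return (None, 0)
--
--     # keep track of "plain text" segments outside any markers and replace them with 'xxx'
--     plain_text_buffer = []
--
--     def flush_plain_text():
--         if plain_text_buffer:
--             # check if there's any non-whitespace in the buffer
--             buf_content = "".join(plain_text_buffer)
--             if buf_content.strip() == "":
--                 # purely whitespace => keep as is
--                 result.append(buf_content)
--             else:
--                 # there's some text => replace entire buffer with "xxx"
--                 result.append("xxx")
--             plain_text_buffer.clear()
--
--     while i < length:
--         marker, m_len = check_marker(line, i)
--         if marker:
--             # found an inline marker and  flush any plain text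
--             flush_plain_text()
--
--             # check a nested marker or open a new one
--             if marker_stack and marker_stack[-1] == marker:
--                 # it's a closing of the current marker
--                 # output the marker as-is
--                 result.append(marker)
--                 marker_stack.pop()
--             else:
--                 # open a new marker
--                 result.append(marker)
--                 marker_stack.append(marker)
--
--             i += m_len
--         else:
--             # not a marker => gather it as plain text
--             plain_text_buffer.append(line[i])
--             i += 1
--
--     # end of line => flush any remaining text
--     flush_plain_text()
--
--     return "".join(result)
-- ===== SOURCE B (Python) =====
-- MARKERS = ('```', '**', '*', '`')
--
--
-- def replace_inlines_with_xxx(line):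
--     # Pass 1: tokenize the line into marker tokens and maximal plain-text runs.
--     tokens = []
--     i = 0
--     n = len(line)
--     while i < n:
--         for m in MARKERS:
--             if line.startswith(m, i):
--                 tokens.append((True, m))
--                 i += len(m)
--                 break
--         else:
--             j = i + 1
--             while j < n and line[j] not in '*`':
--                 j += 1
--             tokens.append((False, line[i:j]))
--             i = j
--     # Pass 2: markers pass through; text runs become 'xxx' unless pure whitespace.
--     return ''.join(
--         tok if is_marker or tok.strip() == '' else 'xxx'
--         for is_marker, tok in tokens
--     )
-- ===== Notes on version B (the rewrite author's own statement) =====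
-- stated objective: faster
-- what changed: B tokenizes the line once into marker tokens and maximal plain-text runs (slicing whole runs instead of appending characters one by one) and then maps each token (text run -> 'xxx' unless pure whitespace); it drops A's per-character buffer and A's marker stack, which never influences the output since both stack branches append the marker unchanged.
import Mathlib
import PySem

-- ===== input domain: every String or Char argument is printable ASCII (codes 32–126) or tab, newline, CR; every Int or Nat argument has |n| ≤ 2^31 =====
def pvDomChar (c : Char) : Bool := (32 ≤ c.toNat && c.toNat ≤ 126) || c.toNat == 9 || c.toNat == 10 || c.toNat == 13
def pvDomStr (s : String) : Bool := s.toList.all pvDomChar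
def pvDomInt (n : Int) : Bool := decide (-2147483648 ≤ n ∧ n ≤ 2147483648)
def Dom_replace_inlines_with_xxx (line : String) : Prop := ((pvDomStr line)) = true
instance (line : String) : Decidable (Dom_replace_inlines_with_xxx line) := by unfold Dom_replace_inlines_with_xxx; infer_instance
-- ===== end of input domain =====

-- B tokenizes once into marker/text-run tokens and maps them, dropping A's per-char buffer and its output-irrelevant marker stack (objective: simpler).
-- ===== PORT A =====
-- check_marker: the startswith chain, in Python's order
def pvCheckMarker (l : List Char) : Option (List Char) :=
  if ['`','`','`'].isPrefixOf l then some ['`','`','`']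
  else if ['*','*'].isPrefixOf l then some ['*','*']
  else if ['*'].isPrefixOf l then some ['*']
  else if ['`'].isPrefixOf l then some ['`']
  else none

-- flush_plain_text
def pvFlush (buf : List Char) (res : List (List Char)) : List (List Char) :=
  if buf = [] then res
  else if PySem.Chars.strip buf = [] then res ++ [buf]
  else res ++ [['x','x','x']]

lemma pvCheckMarker_length_pos {l : List Char} {m : List Char}
    (h : pvCheckMarker l = some m) : 1 ≤ m.length := by
  unfold pvCheckMarker at h
  split_ifs at h <;> cases h <;> decide

-- the while loop of A: state (i via suffix, marker_stack, plain_text_buffer, result)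
def pvALoop (rest : List Char) (stack : List (List Char)) (buf : List Char)
    (res : List (List Char)) : List (List Char) :=
  match rest with
  | [] => pvFlush buf res
  | c :: cs =>
    match hm : pvCheckMarker (c :: cs) with
    | some m =>
      pvALoop ((c :: cs).drop m.length)
        (if stack.getLast? = some m then stack.dropLast else stack ++ [m]) []
        (pvFlush buf res ++ [m])
    | none => pvALoop cs stack (buf ++ [c]) res
  termination_by rest.length
  decreasing_by
  · have := pvCheckMarker_length_pos hm
    simp; omega
  · simp

def replace_inlines_with_xxx (line : String) : String :=
  String.ofList ((pvALoop line.toList [] [] []).flatten)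

-- ===== PORT B =====
def pvMarkers : List (List Char) := [['`','`','`'], ['*','*'], ['*'], ['`']]

def pvIsText (c : Char) : Bool := !(c == '*' || c == '`')

-- pass 1: tokenize into (is_marker, token) pairs
def pvTokenize (l : List Char) : List (Bool × List Char) :=
  match l with
  | [] => []
  | c :: cs =>
    match hm : pvMarkers.find? (fun m => m.isPrefixOf (c :: cs)) with
    | some m => (true, m) :: pvTokenize ((c :: cs).drop m.length)
    | none => (false, c :: cs.takeWhile pvIsText) :: pvTokenize (cs.dropWhile pvIsText)
  termination_by l.length
  decreasing_by
  · have hmem : m ∈ pvMarkers := List.mem_of_find?_eq_some hm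
    have : 1 ≤ m.length := by
      simp [pvMarkers] at hmem
      rcases hmem with h | h | h | h <;> simp [h]
    simp; omega
  · have := List.length_dropWhile_le (p := pvIsText) (l := cs)
    simp; omega

-- pass 2: render each token
def pvTokOut (t : Bool × List Char) : List Char :=
  if t.1 then t.2
  else if PySem.Chars.strip t.2 = [] then t.2
  else ['x','x','x']

def replace_inlines_with_xxx_alt (line : String) : String :=
  String.ofList (((pvTokenize line.toList).map pvTokOut).flatten)

-- ===== PRECONDITION & SPEC =====
def Spec_replace_inlines_with_xxx (line : String) (out : String) : Prop := out = replace_inlines_with_xxx_alt line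
instance (line : String) (out : String) : Decidable (Spec_replace_inlines_with_xxx line out) := by unfold Spec_replace_inlines_with_xxx; infer_instance

-- ===== CLAIM (what is proved, stated in full; the proofs are below) =====
def Claim_equal_replace_inlines_with_xxx : Prop := ∀ (line : String), Dom_replace_inlines_with_xxx line → Spec_replace_inlines_with_xxx line (replace_inlines_with_xxx line)

-- ===== LEMMAS AND PROOFS =====

-- buffered plain text merges with a leading text token of the token list
def pvMerge (buf : List Char) (ts : List (Bool × List Char)) : List (Bool × List Char) :=
  if buf = [] then ts
  else match ts with
    | (false, run) :: rest => (false, buf ++ run) :: rest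
    | _ => (false, buf) :: ts

lemma find?_eq_checkMarker (l : List Char) :
    pvMarkers.find? (fun m => m.isPrefixOf l) = pvCheckMarker l := by
  unfold pvCheckMarker
  cases h1 : List.isPrefixOf ['`','`','`'] l <;>
  cases h2 : List.isPrefixOf ['*','*'] l <;>
  cases h3 : List.isPrefixOf ['*'] l <;>
  cases h4 : List.isPrefixOf ['`'] l <;>
  simp [pvMarkers, List.find?, h1, h2, h3, h4]

lemma checkMarker_none_isText {c : Char} {cs : List Char}
    (h : pvCheckMarker (c :: cs) = none) : pvIsText c = true := by
  unfold pvCheckMarker at h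
  split_ifs at h with h1 h2 h3 h4
  simp [List.isPrefixOf] at h3 h4
  simp [pvIsText]
  exact ⟨fun hc => h3 (by simp [hc]), fun hc => h4 (by simp [hc])⟩

lemma checkMarker_some_head {c : Char} {cs : List Char} {m : List Char}
    (h : pvCheckMarker (c :: cs) = some m) : pvIsText c = false := by
  unfold pvCheckMarker at h
  split_ifs at h with h1 h2 h3 h4
  · simp [List.isPrefixOf] at h1
    simp [pvIsText, ← h1.1]
  · simp [List.isPrefixOf] at h2
    simp [pvIsText, ← h2.1]
  · simp [List.isPrefixOf] at h3
    simp [pvIsText, ← h3]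
  · simp [List.isPrefixOf] at h4
    simp [pvIsText, ← h4]

lemma flush_eq (buf : List Char) (res : List (List Char)) :
    pvFlush buf res = res ++ (pvMerge buf []).map pvTokOut := by
  unfold pvFlush pvMerge
  split_ifs <;> simp [pvTokOut, *]

lemma merge_marker (buf : List Char) (m : List Char) (ts : List (Bool × List Char))
    (res : List (List Char)) :
    res ++ (pvMerge buf ((true, m) :: ts)).map pvTokOut
      = (pvFlush buf res ++ [m]) ++ ts.map pvTokOut := by
  unfold pvFlush pvMerge
  split_ifs <;> simp [pvTokOut, *]

lemma tokenize_marker {c : Char} {cs : List Char} {m : List Char}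
    (h : pvCheckMarker (c :: cs) = some m) :
    pvTokenize (c :: cs) = (true, m) :: pvTokenize ((c :: cs).drop m.length) := by
  rw [pvTokenize]
  split
  · rename_i m2 hm2
    rw [find?_eq_checkMarker, h] at hm2
    injection hm2 with e
    subst e
    rfl
  · rename_i hm2
    rw [find?_eq_checkMarker, h] at hm2
    simp at hm2

lemma tokenize_text {c : Char} {cs : List Char}
    (h : pvCheckMarker (c :: cs) = none) :
    pvTokenize (c :: cs)
      = (false, c :: cs.takeWhile pvIsText) :: pvTokenize (cs.dropWhile pvIsText) := by
  rw [pvTokenize]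
  split
  · rename_i m2 hm2
    rw [find?_eq_checkMarker, h] at hm2
    simp at hm2
  · rfl

lemma merge_shift {c : Char} {cs : List Char} (buf : List Char)
    (h : pvCheckMarker (c :: cs) = none) :
    pvMerge buf (pvTokenize (c :: cs)) = pvMerge (buf ++ [c]) (pvTokenize cs) := by
  rw [tokenize_text h]
  match cs with
  | [] =>
    simp only [pvTokenize, List.takeWhile_nil, List.dropWhile_nil, pvMerge]
    split_ifs <;> simp_all
  | d :: ds =>
    match hm : pvCheckMarker (d :: ds) with
    | some m =>
      have hd : pvIsText d = false := checkMarker_some_head hm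
      have ht : (d :: ds).takeWhile pvIsText = [] := by simp [hd]
      have hdw : (d :: ds).dropWhile pvIsText = d :: ds := by simp [hd]
      rw [ht, hdw, tokenize_marker hm]
      simp only [pvMerge]
      split_ifs <;> simp_all
    | none =>
      have hd : pvIsText d = true := checkMarker_none_isText hm
      have ht : (d :: ds).takeWhile pvIsText = d :: ds.takeWhile pvIsText := by
        simp [hd]
      have hdw : (d :: ds).dropWhile pvIsText = ds.dropWhile pvIsText := by
        simp [hd]
      rw [ht, hdw, tokenize_text hm]
      simp only [pvMerge]
      split_ifs <;> simp_all

lemma aloop_eq (rest : List Char) (stack : List (List Char)) (buf : List Char)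
    (res : List (List Char)) :
    pvALoop rest stack buf res = res ++ (pvMerge buf (pvTokenize rest)).map pvTokOut := by
  induction rest, stack, buf, res using pvALoop.induct with
  | case1 stack buf res =>
    rw [pvALoop]
    simp [pvTokenize]
    exact flush_eq buf res
  | case2 stack buf res c cs m hm ih =>
    rw [pvALoop]
    split
    · rename_i m' hm'
      rw [hm] at hm'
      injection hm' with hmm
      subst hmm
      simp only [dite_eq_ite] at ih
      rw [ih, tokenize_marker hm, merge_marker]
      simp [pvMerge]
    · rename_i hm2
      rw [hm] at hm2
      simp at hm2
  | case3 stack buf res c cs hm ih =>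
    rw [pvALoop]
    split
    · rename_i m' hm2
      rw [hm] at hm2
      simp at hm2
    · rw [ih, merge_shift buf hm]

-- ===== VERDICT (by name: the statement is the Claim_ definition above) =====
theorem replace_inlines_with_xxx_spec : Claim_equal_replace_inlines_with_xxx := by
  intro line _
  unfold Spec_replace_inlines_with_xxx replace_inlines_with_xxx replace_inlines_with_xxx_alt
  rw [aloop_eq]
  simp [pvMerge]
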